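-- pv_equiv track=rewrite | github.com/2HyeokJun/coding_test_repo | 백준/Silver/17413. 단어 뒤집기 2/단어 뒤집기 2.py | solution
-- ===== SOURCE A (Python) =====
-- from collections import deque
-- import copy
--
-- def solution(str):
--     answer = ""
--     temp_deque = deque()
--
--     is_tag_opened = False
--     for char in str:
--         if char == "<":
--             is_tag_opened = True
--             for temp_char in copy.deepcopy(temp_deque):
--                 popped = temp_deque.popleft()
--                 answer += popped
--         if is_tag_opened:
--             answer += char
--         elif char != " ":
--             temp_deque.appendleft(char)
--         if char == ">":
--             is_tag_opened = False
--         if not is_tag_opened and char == " ":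
--             for temp_char in copy.deepcopy(temp_deque):
--                 popped = temp_deque.popleft()
--                 answer += popped
--             answer += " "
--
--     for temp_char in copy.deepcopy(temp_deque):
--         popped = temp_deque.popleft()
--         answer += popped
--     return answer
-- ===== SOURCE B (Python) =====
-- def solution(str):
--     # Tokenizer: copy tags verbatim, copy spaces, reverse each word (ends at space or '<').
--     out = []
--     i, n = 0, len(str)
--     while i < n:
--         c = str[i]
--         if c == '<':
--             k = str.find('>', i)
--             j = n if k == -1 else k + 1
--             out.append(str[i:j])
--         elif c == ' ':
--             out.append(' ')
--             j = i + 1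
--         else:
--             j = i
--             while j < n and str[j] != ' ' and str[j] != '<':
--                 j += 1
--             out.append(str[i:j][::-1])
--         i = j
--     return ''.join(out)
-- ===== Notes on version B (the rewrite author's own statement) =====
-- stated objective: simpler
-- what changed: Replaced A's per-character state machine with a deque, a tag flag and repeated deque flushes (each preceded by a deepcopy of the deque) by a plain tokenizer that walks the string once, copying tag segments and spaces verbatim and reversing each word slice.
import Mathlib
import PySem

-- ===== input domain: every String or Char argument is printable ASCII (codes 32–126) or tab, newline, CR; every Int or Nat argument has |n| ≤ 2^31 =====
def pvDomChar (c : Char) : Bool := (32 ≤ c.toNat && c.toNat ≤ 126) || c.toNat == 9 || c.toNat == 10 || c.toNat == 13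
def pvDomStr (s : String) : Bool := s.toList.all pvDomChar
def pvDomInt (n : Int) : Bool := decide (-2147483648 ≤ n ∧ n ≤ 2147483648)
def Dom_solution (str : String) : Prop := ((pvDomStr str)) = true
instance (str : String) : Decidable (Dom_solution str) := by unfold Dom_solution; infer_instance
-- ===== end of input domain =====

-- B replaces A's deque/state-machine scan (with a deepcopy-flush at every word boundary)
-- by a single-pass tokenizer: tags and spaces copied verbatim, each word slice reversed.

-- ===== PORT A =====
-- one loop step of A: state = (answer, temp_deque (head = leftmost), is_tag_opened)
def stepA (st : List Char × List Char × Bool) (c : Char) : List Char × List Char × Bool :=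
  let (ans, temp, opn) :=
    if c = '<' then (st.1 ++ st.2.1, ([] : List Char), true) else st
  let (ans, temp) :=
    if opn then (ans ++ [c], temp)
    else if c ≠ ' ' then (ans, c :: temp) else (ans, temp)
  let opn := if c = '>' then false else opn
  if opn = false ∧ c = ' ' then (ans ++ temp ++ [' '], [], opn)
  else (ans, temp, opn)

def solution (str : String) : String :=
  let st := str.toList.foldl stepA ([], [], false)
  String.ofList (st.1 ++ st.2.1)

-- ===== PORT B =====
-- recursion on the remaining characters = B's while loop advancing index i;
-- takeWhile/dropWhile = B's str.find('>', i) / inner word scan (exact on lists of chars)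
def altGo : List Char → List Char
  | [] => []
  | c :: rest =>
    if c = '<' then
      match _h : rest.dropWhile (· != '>') with
      | [] => c :: rest.takeWhile (· != '>')
      | g :: rest' => c :: (rest.takeWhile (· != '>') ++ g :: altGo rest')
    else if c = ' ' then ' ' :: altGo rest
    else
      (rest.takeWhile (fun x => x != ' ' && x != '<')).reverse
        ++ c :: altGo (rest.dropWhile (fun x => x != ' ' && x != '<'))
termination_by l => l.length
decreasing_by
  · have := List.length_dropWhile_le (p := (· != '>')) (l := rest)
    rw [_h] at this; simp at this ⊢; omega
  · simp
  · have := List.length_dropWhile_le (p := fun x => x != ' ' && x != '<') (l := rest)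
    simp at this ⊢; omega

def solution_alt (str : String) : String := String.ofList (altGo str.toList)

-- ===== PRECONDITION & SPEC =====
def Spec_solution (str : String) (out : String) : Prop := out = solution_alt str
instance (str : String) (out : String) : Decidable (Spec_solution str out) := by unfold Spec_solution; infer_instance

-- ===== CLAIM (what is proved, stated in full; the proofs are below) =====
def Claim_equal_solution : Prop := ∀ (str : String), Dom_solution str → Spec_solution str (solution str)

-- ===== LEMMAS AND PROOFS =====

lemma stepA_lt (ans temp : List Char) :
    stepA (ans, temp, false) '<' = (ans ++ temp ++ ['<'], [], true) := by
  simp [stepA]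

lemma stepA_space (ans temp : List Char) :
    stepA (ans, temp, false) ' ' = (ans ++ temp ++ [' '], [], false) := by
  simp [stepA]

lemma stepA_word (ans temp : List Char) (c : Char) (h1 : c ≠ ' ') (h2 : c ≠ '<') :
    stepA (ans, temp, false) c = (ans, c :: temp, false) := by
  simp [stepA, h1, h2]

lemma stepA_tag (ans : List Char) (c : Char) (h : c ≠ '>') :
    stepA (ans, [], true) c = (ans ++ [c], [], true) := by
  by_cases hc : c = '<' <;> simp [stepA, hc, h]

lemma stepA_close (ans : List Char) :
    stepA (ans, [], true) '>' = (ans ++ ['>'], [], false) := by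
  simp [stepA]

-- consuming word characters only pushes them onto the deque front
lemma foldA_word (w : List Char) (hw : ∀ c ∈ w, c ≠ ' ' ∧ c ≠ '<') :
    ∀ (rest ans temp : List Char),
      (w ++ rest).foldl stepA (ans, temp, false)
        = rest.foldl stepA (ans, w.reverse ++ temp, false) := by
  induction w with
  | nil => intro rest ans temp; simp
  | cons c w ih =>
      intro rest ans temp
      have hc := hw c (by simp)
      simp only [List.cons_append, List.foldl_cons,
        stepA_word ans temp c hc.1 hc.2]
      rw [ih (fun x hx => hw x (by simp [hx])) rest ans (c :: temp)]
      simp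

-- while a tag is open, characters are copied to the answer verbatim
lemma foldA_tag (pre : List Char) (hp : ∀ c ∈ pre, c ≠ '>') :
    ∀ (rest ans : List Char),
      (pre ++ rest).foldl stepA (ans, [], true)
        = rest.foldl stepA (ans ++ pre, [], true) := by
  induction pre with
  | nil => intro rest ans; simp
  | cons c pre ih =>
      intro rest ans
      simp only [List.cons_append, List.foldl_cons,
        stepA_tag ans c (hp c (by simp))]
      rw [ih (fun x hx => hp x (by simp [hx])) rest (ans ++ [c])]
      simp

lemma takeWhile_ne_gt (rest : List Char) :
    ∀ c ∈ rest.takeWhile (· != '>'), c ≠ '>' := by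
  intro c hc
  have := List.mem_takeWhile_imp hc
  simpa using this

lemma foldA_tag_nil (pre : List Char) (hp : ∀ c ∈ pre, c ≠ '>') (ans : List Char) :
    pre.foldl stepA (ans, [], true) = (ans ++ pre, [], true) := by
  have := foldA_tag pre hp [] ans
  simpa using this

lemma altGo_lt_none (rest : List Char) (h : rest.dropWhile (· != '>') = []) :
    altGo ('<' :: rest) = '<' :: rest.takeWhile (· != '>') := by
  rw [altGo]
  split
  · split
    · rfl
    · rename_i g r2 heq
      rw [h] at heq; cases heq
  · simp_all

lemma altGo_lt_some (rest r' : List Char) (g : Char)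
    (h : rest.dropWhile (· != '>') = g :: r') :
    altGo ('<' :: rest) = '<' :: (rest.takeWhile (· != '>') ++ g :: altGo r') := by
  rw [altGo]
  split
  · split
    · rename_i heq
      rw [h] at heq; cases heq
    · rename_i g2 r2 heq
      rw [h] at heq
      injection heq with h1 h2
      subst h1; subst h2; rfl
  · simp_all

lemma mainAux : ∀ (n : Nat) (l : List Char), l.length ≤ n → ∀ ans : List Char,
    (l.foldl stepA (ans, [], false)).1 ++ (l.foldl stepA (ans, [], false)).2.1
      = ans ++ altGo l := by
  intro n
  induction n with
  | zero =>
      intro l hl ans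
      have : l = [] := List.length_eq_zero_iff.mp (Nat.le_zero.mp hl)
      subst this; simp [altGo]
  | succ n ih =>
      intro l hl ans
      match l with
      | [] => simp [altGo]
      | c :: rest =>
        by_cases hlt : c = '<'
        · subst hlt
          have hsplit := List.takeWhile_append_dropWhile (p := (· != '>')) (l := rest)
          rw [altGo]
          simp only [List.foldl_cons]
          rw [show stepA (ans, [], false) '<' = (ans ++ ['<'], [], true) by
                simpa using stepA_lt ans []]
          match hdrop : rest.dropWhile (· != '>') with
          | [] =>
              rw [hdrop] at hsplit
              conv_lhs => rw [← hsplit]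
              simp only [List.append_nil]
              rw [foldA_tag_nil _ (takeWhile_ne_gt rest)]
              simp
          | g :: rest' =>
              have hg : g = '>' := by
                have := List.head?_dropWhile_not (p := (· != '>')) (l := rest)
                rw [hdrop] at this; simpa using this
              subst hg
              rw [hdrop] at hsplit
              conv_lhs => rw [← hsplit]
              rw [show rest.takeWhile (· != '>') ++ '>' :: rest' =
                    rest.takeWhile (· != '>') ++ ('>' :: rest') by simp,
                  foldA_tag _ (takeWhile_ne_gt rest) ('>' :: rest') (ans ++ ['<'])]
              simp only [List.foldl_cons, stepA_close]
              have hlen : rest'.length ≤ n := by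
                have h1 := List.length_dropWhile_le (p := (· != '>')) (l := rest)
                rw [hdrop] at h1
                simp at h1 hl; omega
              rw [ih rest' hlen]
              simp
        · by_cases hsp : c = ' '
          · subst hsp
            simp only [List.foldl_cons, stepA_space]
            rw [ih rest (by simp at hl; omega)]
            rw [altGo]
            simp
          · -- word character
            have hw : ∀ x ∈ c :: rest.takeWhile (fun x => x != ' ' && x != '<'),
                x ≠ ' ' ∧ x ≠ '<' := by
              intro x hx
              rcases List.mem_cons.mp hx with h | h
              · subst h; exact ⟨hsp, hlt⟩
              · have := List.mem_takeWhile_imp h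
                simp at this; exact this
            have hsplit := List.takeWhile_append_dropWhile
              (p := fun x => x != ' ' && x != '<') (l := rest)
            have hrlen : rest.length ≤ n := by simp at hl; omega
            conv_lhs => rw [show c :: rest =
              (c :: rest.takeWhile (fun x => x != ' ' && x != '<'))
                ++ rest.dropWhile (fun x => x != ' ' && x != '<') by
                simp [hsplit]]
            rw [foldA_word _ hw _ ans []]
            rw [altGo]
            simp only [if_neg hlt, if_neg hsp]
            have hr'len := List.length_dropWhile_le
              (p := fun x => x != ' ' && x != '<') (l := rest)
            match hrdef : rest.dropWhile (fun x => x != ' ' && x != '<') with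
            | [] => simp [altGo]
            | d :: r'' =>
              rw [hrdef] at hr'len
              have hd : (d != ' ' && d != '<') = false := by
                have := List.head?_dropWhile_not
                  (p := fun x => x != ' ' && x != '<') (l := rest)
                rw [hrdef] at this; simpa using this
              have hd' : d = ' ' ∨ d = '<' := by
                simp at hd
                by_cases h1 : d = ' '
                · exact Or.inl h1
                · exact Or.inr (hd h1)
              rcases hd' with h1 | h1
              · subst h1
                simp only [List.foldl_cons, stepA_space]
                rw [ih r'' (by simp at hr'len; omega)]
                simp [altGo]
              · subst h1
                simp only [List.foldl_cons, stepA_lt]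
                have hsplit2 := List.takeWhile_append_dropWhile
                  (p := (· != '>')) (l := r'')
                have hr2len := List.length_dropWhile_le (p := (· != '>')) (l := r'')
                match hdrop : r''.dropWhile (· != '>') with
                | [] =>
                    rw [hdrop] at hsplit2
                    conv_lhs => rw [show r'' = r''.takeWhile (· != '>') by
                      simpa using hsplit2.symm]
                    rw [foldA_tag_nil _ (takeWhile_ne_gt r'')]
                    simp [altGo_lt_none _ hdrop]
                | g :: r₃ =>
                    have hg : g = '>' := by
                      have := List.head?_dropWhile_not (p := (· != '>')) (l := r'')
                      rw [hdrop] at this; simpa using this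
                    subst hg
                    rw [hdrop] at hsplit2
                    conv_lhs => rw [← hsplit2]
                    rw [show r''.takeWhile (· != '>') ++ '>' :: r₃ =
                          r''.takeWhile (· != '>') ++ ('>' :: r₃) by simp,
                        foldA_tag _ (takeWhile_ne_gt r'')]
                    simp only [List.foldl_cons, stepA_close]
                    have hlen3 : r₃.length ≤ n := by
                      rw [hdrop] at hr2len
                      simp at hr2len hr'len; omega
                    rw [ih r₃ hlen3]
                    simp [altGo_lt_some _ _ _ hdrop]

-- ===== VERDICT (by name: the statement is the Claim_ definition above) =====
theorem solution_spec : Claim_equal_solution := by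
  intro str _
  unfold Spec_solution solution solution_alt
  have h := mainAux str.toList.length str.toList (le_refl _) []
  simp only [List.nil_append] at h
  simp [h]
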